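-- pv_equiv track=rewrite | github.com/compi-migui/jirate | trolly/jira_cli.py | split_issue_text
-- ===== SOURCE A (Python) =====
-- def split_issue_text(text):
--     lines = text.split('\n')
--     name = lines[0]
--     desc = ''
--     if not len(name):
--         return (None, None)
--     lines.pop(0)
--     while len(lines) and lines[0] == '':
--         lines.pop(0)
--     if len(lines):
--         desc = '\n'.join(lines)
--     return (name, desc)
-- ===== SOURCE B (Python) =====
-- def split_issue_text(text):
--     parts = text.split('\n', 1)
--     name = parts[0]
--     if not name:
--         return (None, None)
--     desc = parts[1].lstrip('\n') if len(parts) > 1 else ''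
--     return (name, desc)
-- ===== Notes on version B (the rewrite author's own statement) =====
-- stated objective: simpler
-- what changed: Replaces the full split into a line list plus a destructive while/pop loop with a single maxsplit-1 split and one left-strip of newline characters on the remainder.
import Mathlib
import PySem

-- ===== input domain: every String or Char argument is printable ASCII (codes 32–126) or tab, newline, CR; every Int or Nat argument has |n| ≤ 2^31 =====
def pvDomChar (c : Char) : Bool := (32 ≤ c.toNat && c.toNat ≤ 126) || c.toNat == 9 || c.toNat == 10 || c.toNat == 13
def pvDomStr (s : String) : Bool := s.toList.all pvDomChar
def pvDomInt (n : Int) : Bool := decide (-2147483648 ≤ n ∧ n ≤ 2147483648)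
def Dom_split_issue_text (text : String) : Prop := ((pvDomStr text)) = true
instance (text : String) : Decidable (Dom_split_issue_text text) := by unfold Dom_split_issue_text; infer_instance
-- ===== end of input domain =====

-- B replaces A's full split + destructive while/pop loop by one maxsplit-1 split and a left-strip of newlines; objective: simpler.

-- ===== PORT A =====
-- the `while len(lines) and lines[0] == '': lines.pop(0)` loop
def dropEmptyA : List String → List String
  | [] => []
  | l :: ls => if l == "" then dropEmptyA ls else l :: ls

def split_issue_text (text : String) : Option String × Option String :=
  match PySem.Str.split? text "\n" with
  | none => (none, none)   -- unreachable: the separator "\n" is nonempty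
  | some lines =>
    match PySem.List.pyGet? lines 0 with
    | none => (none, none) -- unreachable: split always returns a nonempty list
    | some name =>
      if PySem.Str.len name == 0 then (none, none)
      else
        let lines1 := lines.tail            -- lines.pop(0)
        let lines2 := dropEmptyA lines1     -- the while loop
        let desc := if lines2.length ≠ 0 then PySem.Str.join "\n" lines2 else ""
        (some name, some desc)

-- ===== PORT B =====
def split_issue_text_alt (text : String) : Option String × Option String :=
  match PySem.Str.splitMax? text "\n" 1 with
  | none => (none, none)   -- unreachable: the separator "\n" is nonempty
  | some parts =>
    match parts with
    | [] => (none, none)   -- unreachable: split always returns a nonempty list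
    | name :: rest =>
      if name == "" then (none, none)
      else
        -- parts[1].lstrip('\n') if len(parts) > 1 else '': lstrip with the char set {'\n'}
        -- is exactly dropWhile (· == '\n') on the code points
        let desc := match rest with
          | [r] => String.ofList (r.toList.dropWhile (· == '\n'))
          | _ => ""
        (some name, some desc)

-- ===== PRECONDITION & SPEC =====
def Spec_split_issue_text (text : String) (out : Option String × Option String) : Prop := out = split_issue_text_alt text
instance (text : String) (out : Option String × Option String) : Decidable (Spec_split_issue_text text out) := by unfold Spec_split_issue_text; infer_instance

-- ===== CLAIM (what is proved, stated in full; the proofs are below) =====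
def Claim_equal_split_issue_text : Prop := ∀ (text : String), Dom_split_issue_text text → Spec_split_issue_text text (split_issue_text text)

-- ===== LEMMAS AND PROOFS =====

-- reference splitter on '\n' (full split) and its maxsplit=1 variant
def consHead (c : Char) : List (List Char) → List (List Char)
  | [] => [[c]]
  | x :: xs => (c :: x) :: xs

def spl : List Char → List (List Char)
  | [] => [[]]
  | c :: rest => if c = '\n' then [] :: spl rest else consHead c (spl rest)

def sp1 : List Char → List (List Char)
  | [] => [[]]
  | c :: rest => if c = '\n' then [[], rest] else consHead c (sp1 rest)

def mapHead (f : List Char → List Char) : List (List Char) → List (List Char)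
  | [] => []
  | x :: xs => f x :: xs

theorem spl_ne_nil (s : List Char) : spl s ≠ [] := by
  cases s with
  | nil => simp [spl]
  | cons c rest =>
    simp only [spl]
    split
    · simp
    · cases h : spl rest <;> simp [consHead]

theorem sp1_ne_nil (s : List Char) : sp1 s ≠ [] := by
  cases s with
  | nil => simp [sp1]
  | cons c rest =>
    simp only [sp1]
    split
    · simp
    · cases h : sp1 rest <;> simp [consHead]

theorem nl_notMem_spl (s : List Char) : ∀ x ∈ spl s, '\n' ∉ x := by
  induction s with
  | nil => simp [spl]
  | cons c rest ih =>
    intro x hx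
    by_cases hc : c = '\n'
    · rw [show spl (c :: rest) = [] :: spl rest by simp [spl, hc]] at hx
      rcases List.mem_cons.mp hx with h | h
      · simp [h]
      · exact ih x h
    · rw [show spl (c :: rest) = consHead c (spl rest) by simp [spl, hc]] at hx
      cases h : spl rest with
      | nil => exact absurd h (spl_ne_nil rest)
      | cons y ys =>
        rw [h, consHead] at hx
        rcases List.mem_cons.mp hx with h' | h'
        · subst h'
          intro hmem
          rcases List.mem_cons.mp hmem with h'' | h''
          · exact hc h''.symm
          · exact ih y (h ▸ List.mem_cons_self ..) h''
        · exact ih x (h ▸ List.mem_cons_of_mem _ h')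

theorem go_spl (l : List Char) : ∀ (fuel : Nat) (cur : List Char) (acc : List (List Char)),
    l.length ≤ fuel →
    PySem.Chars.splitOn.go ['\n'] fuel l cur acc = acc.reverse ++ mapHead (cur.reverse ++ ·) (spl l) := by
  induction l with
  | nil =>
    intro fuel cur acc _
    cases fuel <;> simp [PySem.Chars.splitOn.go, spl, mapHead]
  | cons c rest ih =>
    intro fuel cur acc hf
    cases fuel with
    | zero => simp at hf
    | succ f =>
      by_cases hc : c = '\n'
      · subst hc
        have hpre : List.isPrefixOf ['\n'] ('\n' :: rest) = true := by
          simp [List.isPrefixOf]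
        simp only [PySem.Chars.splitOn.go, hpre, if_pos]
        rw [show List.drop (['\n'].length) ('\n' :: rest) = rest from rfl]
        rw [ih f [] (cur.reverse :: acc) (by simpa using hf)]
        cases h : spl rest with
        | nil => exact absurd h (spl_ne_nil rest)
        | cons y ys => simp [spl, mapHead, h]
      · have hpre : List.isPrefixOf ['\n'] (c :: rest) = false := by
          simp [List.isPrefixOf]
          intro h; exact absurd h.symm hc
        simp only [PySem.Chars.splitOn.go, hpre]
        rw [if_neg (by simp)]
        rw [ih f (c :: cur) acc (by simpa using Nat.le_of_succ_le_succ hf)]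
        cases h : spl rest with
        | nil => exact absurd h (spl_ne_nil rest)
        | cons y ys => simp [spl, hc, h, consHead, mapHead]

theorem go1_zero (fuel : Nat) (l cur : List Char) (acc : List (List Char)) :
    PySem.Chars.splitOnMax.go ['\n'] fuel 0 l cur acc = acc.reverse ++ [cur.reverse ++ l] := by
  cases fuel with
  | zero => simp [PySem.Chars.splitOnMax.go]
  | succ f => cases l <;> simp [PySem.Chars.splitOnMax.go]

theorem go_sp1 (l : List Char) : ∀ (fuel : Nat) (cur : List Char) (acc : List (List Char)),
    l.length ≤ fuel →
    PySem.Chars.splitOnMax.go ['\n'] fuel 1 l cur acc = acc.reverse ++ mapHead (cur.reverse ++ ·) (sp1 l) := by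
  induction l with
  | nil =>
    intro fuel cur acc _
    cases fuel <;> simp [PySem.Chars.splitOnMax.go, sp1, mapHead]
  | cons c rest ih =>
    intro fuel cur acc hf
    cases fuel with
    | zero => simp at hf
    | succ f =>
      by_cases hc : c = '\n'
      · subst hc
        have hpre : List.isPrefixOf ['\n'] ('\n' :: rest) = true := by
          simp [List.isPrefixOf]
        simp only [PySem.Chars.splitOnMax.go, hpre, if_pos]
        rw [if_neg (by simp)]
        rw [show List.drop (['\n'].length) ('\n' :: rest) = rest from rfl]
        rw [show (1 : Nat) - 1 = 0 from rfl]
        rw [go1_zero]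
        simp [sp1, mapHead]
      · have hpre : List.isPrefixOf ['\n'] (c :: rest) = false := by
          simp [List.isPrefixOf]
          intro h; exact absurd h.symm hc
        simp only [PySem.Chars.splitOnMax.go, hpre]
        rw [if_neg (by simp), if_neg (by simp)]
        rw [ih f (c :: cur) acc (by simpa using Nat.le_of_succ_le_succ hf)]
        cases h : sp1 rest with
        | nil => exact absurd h (sp1_ne_nil rest)
        | cons y ys => simp [sp1, hc, h, consHead, mapHead]

theorem splitOn_eq_spl (s : List Char) : PySem.Chars.splitOn s ['\n'] = spl s := by
  unfold PySem.Chars.splitOn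
  rw [go_spl s (s.length + 1) [] [] (by omega)]
  cases h : spl s with
  | nil => exact absurd h (spl_ne_nil s)
  | cons y ys => simp [mapHead]

theorem splitOnMax_eq_sp1 (s : List Char) : PySem.Chars.splitOnMax s ['\n'] 1 = sp1 s := by
  unfold PySem.Chars.splitOnMax
  rw [if_neg (by norm_num)]
  rw [show ((1 : Int).toNat) = 1 from rfl]
  rw [go_sp1 s (s.length + 1) [] [] (by omega)]
  cases h : sp1 s with
  | nil => exact absurd h (sp1_ne_nil s)
  | cons y ys => simp [mapHead]

theorem join_spl (s : List Char) : PySem.Chars.join ['\n'] (spl s) = s := by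
  induction s with
  | nil => simp [spl, PySem.Chars.join_singleton]
  | cons c rest ih =>
    by_cases hc : c = '\n'
    · subst hc
      cases h : spl rest with
      | nil => exact absurd h (spl_ne_nil rest)
      | cons y ys =>
        rw [show spl ('\n' :: rest) = [] :: spl rest by simp [spl], h,
            PySem.Chars.join_cons_cons, ← h, ih]
        simp
    · cases h : spl rest with
      | nil => exact absurd h (spl_ne_nil rest)
      | cons y ys =>
        rw [show spl (c :: rest) = consHead c (spl rest) by simp [spl, hc], h]
        cases ys with
        | nil =>
          rw [h, PySem.Chars.join_singleton] at ih
          simp [consHead, PySem.Chars.join_singleton, ih]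
        | cons z zs =>
          rw [h, PySem.Chars.join_cons_cons] at ih
          rw [show consHead c (y :: z :: zs) = (c :: y) :: z :: zs from rfl,
              PySem.Chars.join_cons_cons]
          simp [← ih]

theorem sp1_of_spl (s : List Char) (x : List Char) (xs : List (List Char)) (h : spl s = x :: xs) :
    sp1 s = if xs = [] then [x] else [x, PySem.Chars.join ['\n'] xs] := by
  induction s generalizing x xs with
  | nil =>
    simp [spl] at h
    simp [sp1, h.1, h.2]
  | cons c rest ih =>
    by_cases hc : c = '\n'
    · subst hc
      rw [show spl ('\n' :: rest) = [] :: spl rest by simp [spl]] at h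
      injection h with h1 h2
      subst h1; subst h2
      rw [show sp1 ('\n' :: rest) = [[], rest] by simp [sp1]]
      rw [if_neg (spl_ne_nil rest), join_spl]
    · rw [show spl (c :: rest) = consHead c (spl rest) by simp [spl, hc]] at h
      cases h' : spl rest with
      | nil => exact absurd h' (spl_ne_nil rest)
      | cons y ys =>
        rw [h', consHead] at h
        injection h with h1 h2
        subst h1; subst h2
        rw [show sp1 (c :: rest) = consHead c (sp1 rest) by simp [sp1, hc]]
        rw [ih y ys h']
        split <;> simp [consHead]

-- A's while loop at the Chars level
def dropE : List (List Char) → List (List Char)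
  | [] => []
  | l :: ls => if l = [] then dropE ls else l :: ls

theorem ofList_beq_empty_true (x : List Char) (h : x = []) : (String.ofList x == "") = true := by
  subst h; rfl

theorem ofList_beq_empty_false (x : List Char) (h : x ≠ []) : (String.ofList x == "") = false := by
  apply beq_eq_false_iff_ne.mpr
  intro hh
  exact h (by simpa using congrArg String.toList hh)

theorem dropEmptyA_map (xs : List (List Char)) :
    dropEmptyA (xs.map String.ofList) = (dropE xs).map String.ofList := by
  induction xs with
  | nil => simp [dropEmptyA, dropE]
  | cons x xs ih =>
    simp only [List.map_cons, dropEmptyA, dropE]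
    by_cases hx : x = []
    · rw [ofList_beq_empty_true x hx, if_pos rfl, if_pos hx, ih]
    · rw [ofList_beq_empty_false x hx]
      rw [if_neg (by simp), if_neg hx]
      simp

theorem head_no_nl_dropWhile (x : List Char) (hx : x ≠ []) (hnl : '\n' ∉ x) (rest : List Char) :
    (x ++ rest).dropWhile (· == '\n') = x ++ rest := by
  cases x with
  | nil => exact absurd rfl hx
  | cons c cs =>
    rw [List.cons_append, List.dropWhile_cons_of_neg]
    simp only [beq_iff_eq]
    intro h
    exact hnl (h ▸ List.mem_cons_self ..)

-- the key lemma: lstrip('\n') on the joined remainder = join of the remainder with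
-- leading empty lines dropped (and empty when all of them are empty)
theorem lstrip_join (xs : List (List Char)) (hne : xs ≠ []) (hnl : ∀ x ∈ xs, '\n' ∉ x) :
    (PySem.Chars.join ['\n'] xs).dropWhile (· == '\n') =
      PySem.Chars.join ['\n'] (dropE xs) := by
  induction xs with
  | nil => exact absurd rfl hne
  | cons x xs ih =>
    cases xs with
    | nil =>
      rw [PySem.Chars.join_singleton]
      by_cases hx : x = []
      · subst hx
        simp [dropE, PySem.Chars.join_nil]
      · rw [show dropE [x] = [x] by simp [dropE, hx], PySem.Chars.join_singleton]
        simpa using head_no_nl_dropWhile x hx (hnl x (List.mem_cons_self ..)) []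
    | cons y ys =>
      rw [PySem.Chars.join_cons_cons]
      by_cases hx : x = []
      · subst hx
        rw [show dropE ([] :: y :: ys) = dropE (y :: ys) by simp [dropE]]
        rw [← ih (by simp) (fun a ha => hnl a (List.mem_cons_of_mem _ ha))]
        simp
      · rw [show dropE (x :: y :: ys) = x :: y :: ys by simp [dropE, hx]]
        rw [PySem.Chars.join_cons_cons]
        have := head_no_nl_dropWhile x hx (hnl x (List.mem_cons_self ..))
          (['\n'] ++ PySem.Chars.join ['\n'] (y :: ys))
        simpa using this

theorem map_toList_ofList (l : List (List Char)) :
    List.map (String.toList ∘ String.ofList) l = l := by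
  induction l with
  | nil => rfl
  | cons a l ih => simp only [List.map_cons, Function.comp_apply, String.toList_ofList, ih]

-- ===== VERDICT (by name: the statement is the Claim_ definition above) =====
theorem split_issue_text_spec : Claim_equal_split_issue_text := by
  intro text _
  unfold Spec_split_issue_text split_issue_text split_issue_text_alt
  have hA : PySem.Str.split? text "\n" = some ((spl text.toList).map String.ofList) := by
    rw [PySem.Str.split?]
    rw [show ("\n" : String).toList = ['\n'] from rfl]
    rw [PySem.Chars.split?]
    rw [if_neg (by simp)]
    rw [splitOn_eq_spl]
    rfl
  have hB : PySem.Str.splitMax? text "\n" 1 = some ((sp1 text.toList).map String.ofList) := by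
    rw [PySem.Str.splitMax?]
    rw [show ("\n" : String).toList = ['\n'] from rfl]
    rw [PySem.Chars.splitMax?]
    rw [if_neg (by simp)]
    rw [splitOnMax_eq_sp1]
    rfl
  rw [hA, hB]
  cases hs : spl text.toList with
  | nil => exact absurd hs (spl_ne_nil _)
  | cons x xs =>
    rw [sp1_of_spl _ _ _ hs]
    have hnl := nl_notMem_spl text.toList
    rw [hs] at hnl
    simp only [List.map_cons, PySem.List.pyGet?_zero_cons]
    have hlen0 : (PySem.Str.len (String.ofList x) == 0) = (String.ofList x == "") := by
      by_cases hx : x = []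
      · rw [ofList_beq_empty_true x hx]
        subst hx; rfl
      · rw [ofList_beq_empty_false x hx]
        simp [PySem.Str.len_eq, hx]
    by_cases hx : x = []
    · rw [hlen0, ofList_beq_empty_true x hx]
      subst hx
      by_cases hxs : xs = [] <;> simp [hxs]
    · have hb := ofList_beq_empty_false x hx
      cases hxs : xs with
      | nil =>
        simp [hb, dropEmptyA]
        exact hx
      | cons y ys =>
        simp only [hlen0, hb, Bool.false_eq_true, if_false, List.map_cons,
          List.tail_cons]
        rw [if_neg (List.cons_ne_nil y ys)]
        have hBname : ¬ ((String.ofList x == "") = true) := by simp [hb]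
        simp only [List.map_cons, List.map_nil]
        rw [if_neg hBname]
        simp only [Prod.mk.injEq, Option.some.injEq, true_and]
        rw [← List.map_cons, ← hxs, dropEmptyA_map]
        have hj : (PySem.Chars.join ['\n'] xs).dropWhile (· == '\n') =
            PySem.Chars.join ['\n'] (dropE xs) := by
          apply lstrip_join _ (by simp [hxs])
          intro a ha; exact hnl a (List.mem_cons_of_mem _ ha)
        simp only [String.toList_ofList]
        rw [hj]
        by_cases hd : dropE xs = []
        · simp [hd, PySem.Chars.join_nil]
        · rw [if_pos (by simpa using hd)]
          rw [PySem.Str.join]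
          rw [show ("\n" : String).toList = ['\n'] from rfl]
          rw [List.map_map, map_toList_ofList]
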